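-- pv_equiv track=rewrite | github.com/slyth11907/Python | VDS_Log_Analyzer/VDSLogAnalyzer.py | checkVDSLastStart
-- ===== SOURCE A (Python) =====
-- def checkVDSLastStart(contents):
-- 	#Here we will gather the latest start/stop times if they are found
-- 	startString = "VDS is starting"
-- 	stopString = "VDS_Server is shutting-down"
-- 	startTime = "VDS Was Not Started In This Log."
-- 	stopTime = "VDS Was Not Stopped In This Log."
-- 	for line in contents:
-- 		if startString in line:
-- 			startTime = line.split(",")[0]
-- 		if stopString in line:
-- 			stopTime = line.split(",")[0]
--
-- 	return startTime, stopTime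
-- ===== SOURCE B (Python) =====
-- def checkVDSLastStart(contents):
-- 	# Two reverse scans that stop at the LAST occurrence, instead of one
-- 	# forward pass that keeps overwriting the accumulators.
-- 	lines = list(contents)
-- 	startTime = "VDS Was Not Started In This Log."
-- 	stopTime = "VDS Was Not Stopped In This Log."
-- 	for line in reversed(lines):
-- 		if "VDS is starting" in line:
-- 			startTime = line.split(",")[0]
-- 			break
-- 	for line in reversed(lines):
-- 		if "VDS_Server is shutting-down" in line:
-- 			stopTime = line.split(",")[0]
-- 			break
-- 	return startTime, stopTime
-- ===== Notes on version B (the rewrite author's own statement) =====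
-- stated objective: alternative
-- what changed: Replaces the single forward pass that keeps overwriting two accumulators with two reverse scans that each break at the last occurrence of its marker line.
import Mathlib
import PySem

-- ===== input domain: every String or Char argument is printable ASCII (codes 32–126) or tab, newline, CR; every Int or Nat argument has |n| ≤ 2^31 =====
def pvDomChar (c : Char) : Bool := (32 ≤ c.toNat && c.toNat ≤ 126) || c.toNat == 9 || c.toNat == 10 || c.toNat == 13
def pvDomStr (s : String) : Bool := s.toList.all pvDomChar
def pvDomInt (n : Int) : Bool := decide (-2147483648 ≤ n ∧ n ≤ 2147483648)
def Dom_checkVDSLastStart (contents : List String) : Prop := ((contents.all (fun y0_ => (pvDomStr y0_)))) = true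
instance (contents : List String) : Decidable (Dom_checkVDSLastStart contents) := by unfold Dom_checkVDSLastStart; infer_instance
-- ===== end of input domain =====

-- B replaces A's single forward overwrite-pass by two reverse scans breaking at the last match (alternative decomposition, same cost).

-- shared helper: line.split(",")[0] (split on "," is never empty, so index 0 is safe)
def pvFirstField (line : String) : String :=
  PySem.List.pyGetD ((PySem.Str.split? line ",").getD []) 0 ""

-- ===== PORT A =====
def checkVDSLastStart (contents : List String) : String × String :=
  contents.foldl
    (fun (st : String × String) line =>
      let st := if PySem.Str.isIn "VDS is starting" line then (pvFirstField line, st.2) else st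
      if PySem.Str.isIn "VDS_Server is shutting-down" line then (st.1, pvFirstField line) else st)
    ("VDS Was Not Started In This Log.", "VDS Was Not Stopped In This Log.")

-- ===== PORT B =====
def checkVDSLastStart_alt (contents : List String) : String × String :=
  let lines := contents
  let startTime :=
    match lines.reverse.find? (fun line => PySem.Str.isIn "VDS is starting" line) with
    | some line => pvFirstField line
    | none => "VDS Was Not Started In This Log."
  let stopTime :=
    match lines.reverse.find? (fun line => PySem.Str.isIn "VDS_Server is shutting-down" line) with
    | some line => pvFirstField line
    | none => "VDS Was Not Stopped In This Log."
  (startTime, stopTime)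

-- ===== PRECONDITION & SPEC =====
def Spec_checkVDSLastStart (contents : List String) (out : String × String) : Prop := out = checkVDSLastStart_alt contents
instance (contents : List String) (out : String × String) : Decidable (Spec_checkVDSLastStart contents out) := by unfold Spec_checkVDSLastStart; infer_instance

-- ===== CLAIM (what is proved, stated in full; the proofs are below) =====
def Claim_equal_checkVDSLastStart : Prop := ∀ (contents : List String), Dom_checkVDSLastStart contents → Spec_checkVDSLastStart contents (checkVDSLastStart contents)

-- ===== LEMMAS AND PROOFS =====

-- "last match or default" as B computes one component
def pvLast (p : String → Bool) (xs : List String) (d : String) : String :=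
  match xs.reverse.find? p with
  | some line => pvFirstField line
  | none => d

theorem pvLast_append (p : String → Bool) (xs : List String) (x : String) (d : String) :
    pvLast p (xs ++ [x]) d = if p x then pvFirstField x else pvLast p xs d := by
  unfold pvLast
  simp only [List.reverse_append, List.reverse_cons, List.reverse_nil, List.nil_append,
    List.singleton_append, List.find?_cons]
  cases h : p x <;> simp [h]

theorem foldA_eq (contents : List String) :
    checkVDSLastStart contents =
      (pvLast (fun l => PySem.Str.isIn "VDS is starting" l) contents "VDS Was Not Started In This Log.",
       pvLast (fun l => PySem.Str.isIn "VDS_Server is shutting-down" l) contents "VDS Was Not Stopped In This Log.") := by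
  induction contents using List.reverseRecOn with
  | nil => rfl
  | append_singleton xs x ih =>
      simp only [checkVDSLastStart, List.foldl_append, List.foldl_cons, List.foldl_nil] at *
      rw [ih, pvLast_append, pvLast_append]
      clear ih
      by_cases h1 : PySem.Str.isIn "VDS is starting" x <;>
        by_cases h2 : PySem.Str.isIn "VDS_Server is shutting-down" x <;>
        simp_all

-- ===== VERDICT (by name: the statement is the Claim_ definition above) =====
theorem checkVDSLastStart_spec : Claim_equal_checkVDSLastStart := by
  intro contents _
  unfold Spec_checkVDSLastStart checkVDSLastStart_alt
  rw [foldA_eq]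
  rfl
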